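-- pv_equiv track=rewrite | github.com/goshuirc/irc | girc/ircreactor/envelope.py | tag_unescape
-- ===== SOURCE A (Python) =====
-- _tag_unescapes = {
--     '\\': '\\',
--     ':': ';',
--     's': ' ',
--     'r': '\r',
--     'n': '\n',
-- }
--
-- def tag_unescape(orig):
--     value = ''
--     while len(orig):
--         char = orig[0]
--         orig = orig[1:]
--         if char == '\\':
--             if not orig:
--                 break
--
--             escape = orig[0]
--             orig = orig[1:]
--             value += _tag_unescapes.get(escape, escape)
--         else:
--             value += char
--
--     return value
-- ===== SOURCE B (Python) =====
-- _tag_unescapes = {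
--     '\\': '\\',
--     ':': ';',
--     's': ' ',
--     'r': '\r',
--     'n': '\n',
-- }
--
-- def tag_unescape(orig):
--     # Split on backslashes: each boundary is an escape; an empty chunk means
--     # the escaped character was itself a backslash.
--     chunks = orig.split('\\')
--     out = [chunks[0]]
--     i = 1
--     while i < len(chunks):
--         c = chunks[i]
--         if c:
--             out.append(_tag_unescapes.get(c[0], c[0]) + c[1:])
--             i += 1
--         elif i + 1 < len(chunks):
--             out.append('\\' + chunks[i + 1])
--             i += 2
--         else:
--             i += 1  # trailing lone backslash: dropped
--     return ''.join(out)
-- ===== Notes on version B (the rewrite author's own statement) =====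
-- stated objective: faster
-- what changed: B replaces A's quadratic char-by-char while-loop over a repeatedly re-sliced string with a single split on the backslash separator followed by one pass that maps the first character of each subsequent chunk through the escape table and joins the pieces.
import Mathlib
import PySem

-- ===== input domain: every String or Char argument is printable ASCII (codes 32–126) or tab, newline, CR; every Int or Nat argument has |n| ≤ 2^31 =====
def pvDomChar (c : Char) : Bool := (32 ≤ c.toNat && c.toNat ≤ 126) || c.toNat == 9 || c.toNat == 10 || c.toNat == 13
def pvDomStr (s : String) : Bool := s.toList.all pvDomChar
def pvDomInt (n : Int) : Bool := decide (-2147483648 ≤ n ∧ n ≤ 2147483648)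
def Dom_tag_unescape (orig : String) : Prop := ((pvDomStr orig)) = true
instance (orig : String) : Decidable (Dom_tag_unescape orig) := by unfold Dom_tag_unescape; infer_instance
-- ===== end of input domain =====

-- B replaces A's char-by-char while-loop with one split on '\\' plus a pass over the chunks; same return value on every input.

-- _tag_unescapes.get(escape, escape): the escape table with fall-through (shared by both Pythons)
def tagUnescapesGet (c : Char) : String :=
  if c = '\\' then "\\"
  else if c = ':' then ";"
  else if c = 's' then " "
  else if c = 'r' then "\r"
  else if c = 'n' then "\n"
  else String.ofList [c]

-- ===== PORT A =====
-- A's while-loop: consumes orig char by char, accumulating value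
def tagUnescapeLoop : List Char → String → String
  | [], value => value
  | char :: orig, value =>
    if char = '\\' then
      match orig with
      | [] => value                       -- `if not orig: break`
      | escape :: orig' => tagUnescapeLoop orig' (value ++ tagUnescapesGet escape)
    else
      tagUnescapeLoop orig (value ++ String.ofList [char])

def tag_unescape (orig : String) : String :=
  tagUnescapeLoop orig.toList ""

-- ===== PORT B =====
-- orig.split('\\'), hand-ported step for step over the character list (exact: split on one char)
def splitBackslash : List Char → List (List Char)
  | [] => [[]]
  | c :: rest =>
    let r := splitBackslash rest
    if c = '\\' then [] :: r
    else (c :: r.headD []) :: r.tail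

-- B's loop over chunks[1:]: a nonempty chunk starts with the escaped char; an empty chunk means
-- the escaped char was itself a backslash (the next chunk is then literal text); a trailing
-- empty chunk is a dropped lone backslash
def goChunks : List (List Char) → List Char
  | [] => []
  | [] :: [] => []
  | [] :: next :: rest' => '\\' :: (next ++ goChunks rest')
  | (e :: tl) :: rest => (tagUnescapesGet e).toList ++ tl ++ goChunks rest

def tag_unescape_alt (orig : String) : String :=
  let chunks := splitBackslash orig.toList
  String.ofList (chunks.headD [] ++ goChunks chunks.tail)

-- ===== PRECONDITION & SPEC =====
def Spec_tag_unescape (orig : String) (out : String) : Prop := out = tag_unescape_alt orig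
instance (orig : String) (out : String) : Decidable (Spec_tag_unescape orig out) := by unfold Spec_tag_unescape; infer_instance

-- ===== CLAIM (what is proved, stated in full; the proofs are below) =====
def Claim_equal_tag_unescape : Prop := ∀ (orig : String), Dom_tag_unescape orig → Spec_tag_unescape orig (tag_unescape orig)

-- ===== LEMMAS AND PROOFS =====

-- proof-side reference function: the natural two-char-consuming recursion both ports compute
def unesc : List Char → List Char
  | [] => []
  | c :: rest =>
    if c = '\\' then
      match rest with
      | [] => []
      | e :: rest' => (tagUnescapesGet e).toList ++ unesc rest'
    else
      c :: unesc rest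

theorem splitBackslash_ne_nil (cs : List Char) : splitBackslash cs ≠ [] := by
  cases cs with
  | nil => simp [splitBackslash]
  | cons c rest => simp only [splitBackslash]; split <;> simp

theorem splitBackslash_bs (rest : List Char) :
    splitBackslash ('\\' :: rest) = [] :: splitBackslash rest := by
  rw [splitBackslash.eq_def]; simp

theorem splitBackslash_other (c : Char) (rest : List Char) (h : c ≠ '\\') :
    splitBackslash (c :: rest)
      = (c :: (splitBackslash rest).headD []) :: (splitBackslash rest).tail := by
  rw [splitBackslash.eq_def]; simp [h]

theorem unesc_bs (e : Char) (rest' : List Char) :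
    unesc ('\\' :: e :: rest') = (tagUnescapesGet e).toList ++ unesc rest' := by
  rw [unesc.eq_def]; simp

theorem unesc_other (c : Char) (rest : List Char) (h : c ≠ '\\') :
    unesc (c :: rest) = c :: unesc rest := by
  rw [unesc.eq_def]; simp [h]

theorem loop_bs (e : Char) (orig' : List Char) (v : String) :
    tagUnescapeLoop ('\\' :: e :: orig') v = tagUnescapeLoop orig' (v ++ tagUnescapesGet e) := by
  rw [tagUnescapeLoop.eq_def]; simp

theorem loop_other (c : Char) (orig : List Char) (v : String) (h : c ≠ '\\') :
    tagUnescapeLoop (c :: orig) v = tagUnescapeLoop orig (v ++ String.ofList [c]) := by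
  rw [tagUnescapeLoop.eq_def]; simp [h]

theorem tagUnescapeLoop_eq_unesc (cs : List Char) (v : String) :
    tagUnescapeLoop cs v = v ++ String.ofList (unesc cs) := by
  induction cs using unesc.induct generalizing v with
  | case1 => simp [tagUnescapeLoop, unesc]
  | case2 => simp [tagUnescapeLoop, unesc]
  | case3 e rest' ih =>
      rw [loop_bs, ih, unesc_bs, String.ofList_append, String.ofList_toList,
        ← String.append_assoc]
  | case4 c rest h ih =>
      rw [loop_other c rest v h, ih, unesc_other c rest h,
        show (c :: unesc rest) = [c] ++ unesc rest from rfl,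
        String.ofList_append, ← String.append_assoc]

theorem split_go_eq_unesc (cs : List Char) :
    (splitBackslash cs).headD [] ++ goChunks (splitBackslash cs).tail = unesc cs := by
  induction cs using unesc.induct with
  | case1 => simp [splitBackslash, goChunks, unesc]
  | case2 => simp [splitBackslash, goChunks, unesc]
  | case3 e rest' ih =>
      obtain ⟨h', t', hr⟩ := List.exists_cons_of_ne_nil (splitBackslash_ne_nil rest')
      rw [splitBackslash_bs, List.headD_cons, List.tail_cons, List.nil_append, unesc_bs, ← ih,
        hr, List.headD_cons, List.tail_cons]
      by_cases he : e = '\\'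
      · subst he
        rw [splitBackslash_bs, hr, goChunks.eq_3,
          show (tagUnescapesGet '\\').toList = ['\\'] from rfl, List.cons_append, List.nil_append]
      · rw [splitBackslash_other e rest' he, hr, List.headD_cons, List.tail_cons,
          goChunks.eq_4, List.append_assoc]
  | case4 c rest h ih =>
      rw [splitBackslash_other c rest h, List.headD_cons, List.tail_cons, unesc_other c rest h,
        ← ih, List.cons_append]

-- ===== VERDICT (by name: the statement is the Claim_ definition above) =====
theorem tag_unescape_spec : Claim_equal_tag_unescape := by
  intro orig _
  show tag_unescape orig = tag_unescape_alt orig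
  rw [tag_unescape, tag_unescape_alt, tagUnescapeLoop_eq_unesc, ← split_go_eq_unesc]
  simp
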